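-- pv_equiv track=rewrite | github.com/Jenifer19IFC/IA | AG/AlgoritmoGenetico.py | calcula_fitness
-- ===== SOURCE A (Python) =====
-- def calcula_fitness(individuo):
--     fitness = 0
--     sobreposicoes = 0
--     for nome, disponibilidade in individuo.items():
--         for dia, horas in disponibilidade.items(): # Percorre cada dia e respectivos intervalos de tempo disp. p/ indivíduo atual
--             fitness += len(horas)
--             for outro_nome, outra_disponibilidade in individuo.items():  # Verifique se há sobreposições
--                 if outro_nome != nome:
--                     outras_horas = outra_disponibilidade.get(dia, [])
--                     sobreposicoes += len(set(horas) & set(outras_horas)) # Interseção entre indivíduo atual e outro (horas)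
--
--     # Penaliza a fitness por qualquer sobreposição
--     fitness -= sobreposicoes * 2  # Aumenta o fator de penalização
--     fitness = max(fitness, 1)  # Evite a divisão por zero
--     return fitness
-- ===== SOURCE B (Python) =====
-- def calcula_fitness(individuo):
--     # One pass: count how many people cover each (day, hour) slot, then
--     # penalty = sum over slots of c*(c-1) = number of ordered overlapping pairs.
--     total = 0
--     slots = []
--     for nome, disponibilidade in individuo.items():
--         for dia, horas in disponibilidade.items():
--             total += len(horas)
--             for h in set(horas):
--                 slots.append((dia, h))
--     counts = {}
--     for s in slots:
--         counts[s] = counts.get(s, 0) + 1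
--     penalty = 0
--     for c in counts.values():
--         penalty += c * (c - 1)
--     return max(total - 2 * penalty, 1)
-- ===== Notes on version B (the rewrite author's own statement) =====
-- stated objective: faster
-- what changed: A compares every person's day schedule against every other person's (a quadratic pairwise set-intersection scan); B makes one pass that counts how many people cover each (day, hour) slot and computes the same penalty as the sum of c*(c-1) over slots.
import Mathlib
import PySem

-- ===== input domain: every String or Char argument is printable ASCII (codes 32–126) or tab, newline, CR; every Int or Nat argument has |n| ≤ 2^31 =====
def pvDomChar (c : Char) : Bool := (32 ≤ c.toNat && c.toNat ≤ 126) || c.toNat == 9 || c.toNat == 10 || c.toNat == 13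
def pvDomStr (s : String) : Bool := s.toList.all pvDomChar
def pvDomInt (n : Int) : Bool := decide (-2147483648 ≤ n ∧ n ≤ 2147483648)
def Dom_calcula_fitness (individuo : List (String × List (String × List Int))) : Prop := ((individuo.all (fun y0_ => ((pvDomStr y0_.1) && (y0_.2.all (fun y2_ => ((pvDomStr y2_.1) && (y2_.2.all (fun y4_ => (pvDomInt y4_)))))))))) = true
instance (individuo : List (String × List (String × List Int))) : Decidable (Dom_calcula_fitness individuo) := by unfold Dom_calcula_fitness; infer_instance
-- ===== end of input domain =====

-- B replaces A's O(P²·D) pairwise-intersection scan by one pass that counts, per (day, hour)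
-- slot, how many people cover it, and sums c·(c−1) — an asymptotically faster exact rewrite.

-- ===== PORT A =====
def calcula_fitness (individuo : List (String × List (String × List Int))) : Int :=
  let r := individuo.foldl (fun (acc : Int × Int) p =>
    p.2.foldl (fun (acc : Int × Int) q =>
      (acc.1 + (q.2.length : Int),
       individuo.foldl (fun (s : Int) r =>
         if r.1 ≠ p.1 then
           s + ((PySem.Set.inter (PySem.Set.ofList q.2)
                  (PySem.Set.ofList ((PySem.Dict.mk r.2).getD q.1 []))).length : Int)
         else s) acc.2)) acc) ((0 : Int), (0 : Int))
  max (r.1 - r.2 * 2) 1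

-- ===== PORT B =====
def calcula_fitness_alt (individuo : List (String × List (String × List Int))) : Int :=
  let acc := individuo.foldl (fun (acc : Int × List (String × Int)) p =>
    p.2.foldl (fun (acc : Int × List (String × Int)) q =>
      (acc.1 + (q.2.length : Int),
       (PySem.Set.ofList q.2).foldl (fun sl h => sl ++ [(q.1, h)]) acc.2)) acc)
    ((0 : Int), ([] : List (String × Int)))
  let counts := acc.2.foldl (fun d s => d.insert s (d.getD s 0 + 1)) PySem.Dict.empty
  let penalty := counts.values.foldl (fun t c => t + c * (c - 1)) (0 : Int)
  max (acc.1 - 2 * penalty) 1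

-- ===== PRECONDITION & SPEC =====
-- Pre_ excludes association lists with a duplicated dict key (a person name listed twice, or one
-- person with the same day twice): such lists do not represent a Python dict, whose keys are unique.
def Pre_calcula_fitness (individuo : List (String × List (String × List Int))) : Prop :=
  (individuo.map Prod.fst).Nodup ∧ ∀ p ∈ individuo, (p.2.map Prod.fst).Nodup
instance (individuo : List (String × List (String × List Int))) : Decidable (Pre_calcula_fitness individuo) := by unfold Pre_calcula_fitness; infer_instance
def pvWitness_calcula_fitness : (List (String × List (String × List Int))) :=
  [("ana", [("seg", [1, 2]), ("ter", [3])]), ("bia", [("seg", [2, 5])])]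
def Spec_calcula_fitness (individuo : List (String × List (String × List Int))) (out : Int) : Prop := out = calcula_fitness_alt individuo
instance (individuo : List (String × List (String × List Int))) (out : Int) : Decidable (Spec_calcula_fitness individuo out) := by unfold Spec_calcula_fitness; infer_instance

-- ===== CLAIM (what is proved, stated in full; the proofs are below) =====
def Claim_equal_calcula_fitness : Prop := ∀ (individuo : List (String × List (String × List Int))), Dom_calcula_fitness individuo → Pre_calcula_fitness individuo → Spec_calcula_fitness individuo (calcula_fitness individuo)

-- ===== LEMMAS AND PROOFS =====

-- the multiset of covered (day, hour) slots, one entry per person covering the slot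
def pvEntrySlots (q : String × List Int) : List (String × Int) :=
  (PySem.Set.ofList q.2).map (fun h => (q.1, h))
def pvSlots (ind : List (String × List (String × List Int))) : List (String × Int) :=
  ind.flatMap (fun p => p.2.flatMap pvEntrySlots)
-- does person with availability r cover hour h on day d? (0/1)
def pvB (r : List (String × List Int)) (d : String) (h : Int) : Int :=
  if h ∈ PySem.Set.ofList ((PySem.Dict.mk r).getD d []) then 1 else 0
-- number of persons covering slot (d, h)
def pvN (ind : List (String × List (String × List Int))) (d : String) (h : Int) : Int :=
  (ind.map (fun r => pvB r.2 d h)).sum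

theorem pv_sum_sum_comm {α β : Type} (l : List α) (m : List β) (f : α → β → Int) :
    (l.map (fun r => (m.map (f r)).sum)).sum = (m.map (fun h => (l.map (fun r => f r h)).sum)).sum := by
  induction l with
  | nil => simp
  | cons a l ih => simp only [List.map_cons, List.sum_cons, ih, PySem.List.sum_map_add_int]

theorem pv_sum_ite_single {α : Type} (l : List α) (key : α → String) (hnd : (l.map key).Nodup)
    {p : α} (hp : p ∈ l) (g : α → Int) :
    (l.map (fun r => if key r = key p then g r else 0)).sum = g p := by
  induction l with
  | nil => simp at hp
  | cons a l ih =>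
    simp only [List.map_cons, List.nodup_cons] at hnd
    rcases List.mem_cons.1 hp with h | h
    · subst h
      simp only [List.map_cons, List.sum_cons]
      have hz : ∀ x ∈ l.map (fun r => if key r = key p then g r else 0), x = 0 := by
        intro x hx
        rcases List.mem_map.1 hx with ⟨r, hr, rfl⟩
        have : key r ≠ key p := fun he => hnd.1 (he ▸ List.mem_map_of_mem hr)
        simp [this]
      rw [List.sum_eq_zero hz]; simp
    · have hne : key a ≠ key p := fun he => hnd.1 (he ▸ List.mem_map_of_mem h)
      rw [List.map_cons, List.sum_cons, if_neg hne, ih hnd.2 h, zero_add]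

theorem pv_inter_len (A B : List Int) :
    ((PySem.Set.inter (PySem.Set.ofList A) (PySem.Set.ofList B)).length : Int)
      = ((PySem.Set.ofList A).map (fun h => if h ∈ PySem.Set.ofList B then (1 : Int) else 0)).sum := by
  have h1 := PySem.List.sum_map_ite_one_zero (fun h => PySem.Set.contains (PySem.Set.ofList B) h) (PySem.Set.ofList A)
  rw [PySem.Set.inter, ← List.countP_eq_length_filter, ← h1]
  simp


theorem pv_lookup_sum (l : List (String × List Int)) (hnd : (l.map Prod.fst).Nodup) (d : String) (h : Int) :
    (l.map (fun q => if q.1 = d ∧ h ∈ PySem.Set.ofList q.2 then (1 : Int) else 0)).sum = pvB l d h := by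
  induction l with
  | nil => simp [pvB, PySem.Dict.getD, PySem.Dict.get?]
  | cons q rest ih =>
    simp only [List.map_cons, List.nodup_cons] at hnd
    by_cases hq : q.1 = d
    · have hrest : ∀ x ∈ rest.map (fun q => if q.1 = d ∧ h ∈ PySem.Set.ofList q.2 then (1 : Int) else 0), x = 0 := by
        intro x hx
        rcases List.mem_map.1 hx with ⟨r, hr, rfl⟩
        have : r.1 ≠ d := fun he => hnd.1 (hq ▸ he ▸ List.mem_map_of_mem hr)
        simp [this]
      rw [List.map_cons, List.sum_cons, List.sum_eq_zero hrest, add_zero]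
      have hg : (PySem.Dict.mk (q :: rest)).getD d [] = q.2 := by
        rw [PySem.Dict.getD_eq_get?_getD, PySem.Dict.get?_mk_cons]
        simp [hq]
      simp [pvB, hg, hq]
    · rw [List.map_cons, List.sum_cons, if_neg (by simp [hq]), zero_add, ih hnd.2]
      have hg : (PySem.Dict.mk (q :: rest)).getD d [] = (PySem.Dict.mk rest).getD d [] := by
        rw [PySem.Dict.getD_eq_get?_getD, PySem.Dict.get?_mk_cons, if_neg (by simp [hq]),
          ← PySem.Dict.getD_eq_get?_getD]
      simp [pvB, hg]

theorem pv_count_irrel {α : Type} [DecidableEq α] [BEq α] [LawfulBEq α] (a : α) (xs : List α) :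
    List.count a xs = @List.count α instBEqOfDecidableEq a xs := by
  induction xs with
  | nil => rfl
  | cons x xs ih => simp [List.count_cons, beq_iff_eq, ih]

theorem pv_sum_map_eq_dedup {α : Type} [DecidableEq α] [BEq α] [LawfulBEq α] (l : List α) (g : α → Int) :
    (l.map g).sum = ((PySem.Set.ofList l).map (fun k => (l.count k : Int) * g k)).sum := by
  rw [Finset.sum_list_map_count l g, ← List.sum_toFinset _ (PySem.Set.nodup_ofList l)]
  have ht : (PySem.Set.ofList l).toFinset = l.toFinset := by
    ext x; simp [List.mem_toFinset, PySem.Set.mem_ofList]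
  rw [ht]
  refine Finset.sum_congr rfl fun k _ => ?_
  rw [nsmul_eq_mul]
  exact congrArg (fun n : Nat => (n : Int) * g k) (pv_count_irrel k l).symm

theorem pv_count_entry (q : String × List Int) (d : String) (h : Int) :
    ((pvEntrySlots q).count (d, h) : Int) = if q.1 = d ∧ h ∈ PySem.Set.ofList q.2 then 1 else 0 := by
  by_cases hq : q.1 = d
  · subst hq
    rw [pvEntrySlots, List.count_map_of_injective _ _ (fun a b hab => by simpa using congrArg Prod.snd hab)]
    by_cases hh : h ∈ PySem.Set.ofList q.2
    · simp [hh]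
    · simp [List.count_eq_zero_of_not_mem hh, hh]
  · have hnm : (d, h) ∉ pvEntrySlots q := by
      intro hm
      rcases List.mem_map.1 hm with ⟨x, _, he⟩
      exact hq (congrArg Prod.fst he)
    simp [List.count_eq_zero_of_not_mem hnm, hq]

theorem pv_count_slots (ind : List (String × List (String × List Int)))
    (hdays : ∀ p ∈ ind, (p.2.map Prod.fst).Nodup) (d : String) (h : Int) :
    ((pvSlots ind).count (d, h) : Int) = pvN ind d h := by
  rw [pvSlots, List.count_flatMap, pvN]
  push_cast
  rw [List.map_map]
  refine congrArg List.sum (List.map_congr_left fun p hp => ?_)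
  simp only [Function.comp]
  rw [List.count_flatMap]
  push_cast
  rw [List.map_map, ← pv_lookup_sum p.2 (hdays p hp) d h]
  refine congrArg List.sum (List.map_congr_left fun q _ => ?_)
  simpa using pv_count_entry q d h

theorem pv_foldl_pair {β σ₁ σ₂ : Type} (f : σ₁ → β → σ₁) (g : σ₂ → β → σ₂) (l : List β) (s : σ₁ × σ₂) :
    l.foldl (fun s e => (f s.1 e, g s.2 e)) s = (l.foldl f s.1, l.foldl g s.2) :=
  PySem.List.foldl_prod_mk f g l s.1 s.2

theorem pv_sobreA (ind : List (String × List (String × List Int)))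
    (hpre : Pre_calcula_fitness ind) :
    ind.foldl (fun b p => p.2.foldl (fun b q =>
      ind.foldl (fun (s : Int) r =>
        if r.1 ≠ p.1 then
          s + ((PySem.Set.inter (PySem.Set.ofList q.2)
                 (PySem.Set.ofList ((PySem.Dict.mk r.2).getD q.1 []))).length : Int)
        else s) b) b) 0
      = ((pvSlots ind).map (fun k => pvN ind k.1 k.2 - 1)).sum := by
  obtain ⟨hnames, hdays⟩ := hpre
  -- turn the nested folds into nested sums
  have h1 : (fun (b : Int) (p : String × List (String × List Int)) =>
      p.2.foldl (fun b q => ind.foldl (fun (s : Int) r =>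
        if r.1 ≠ p.1 then
          s + ((PySem.Set.inter (PySem.Set.ofList q.2)
                 (PySem.Set.ofList ((PySem.Dict.mk r.2).getD q.1 []))).length : Int)
        else s) b) b)
      = (fun b p => b + (p.2.map (fun q => (ind.map (fun r =>
          if r.1 ≠ p.1 then
            ((PySem.Set.inter (PySem.Set.ofList q.2)
               (PySem.Set.ofList ((PySem.Dict.mk r.2).getD q.1 []))).length : Int)
          else 0)).sum)).sum) := by
    funext b p
    have h2 : (fun (b : Int) (q : String × List Int) => ind.foldl (fun (s : Int) r =>
        if r.1 ≠ p.1 then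
          s + ((PySem.Set.inter (PySem.Set.ofList q.2)
                 (PySem.Set.ofList ((PySem.Dict.mk r.2).getD q.1 []))).length : Int)
        else s) b)
        = (fun b q => b + (ind.map (fun r =>
            if r.1 ≠ p.1 then
              ((PySem.Set.inter (PySem.Set.ofList q.2)
                 (PySem.Set.ofList ((PySem.Dict.mk r.2).getD q.1 []))).length : Int)
            else 0)).sum) := by
      funext b q
      have h3 : (fun (s : Int) (r : String × List (String × List Int)) =>
          if r.1 ≠ p.1 then
            s + ((PySem.Set.inter (PySem.Set.ofList q.2)
                   (PySem.Set.ofList ((PySem.Dict.mk r.2).getD q.1 []))).length : Int)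
          else s)
          = (fun s r => s + if r.1 ≠ p.1 then
              ((PySem.Set.inter (PySem.Set.ofList q.2)
                 (PySem.Set.ofList ((PySem.Dict.mk r.2).getD q.1 []))).length : Int)
            else 0) := by
        funext s r; split_ifs <;> simp
      rw [h3, PySem.List.foldl_add]
    rw [h2, PySem.List.foldl_add]
  rw [h1, PySem.List.foldl_add, zero_add]
  -- rewrite the right-hand side as the same nested sum shape
  rw [pvSlots, List.flatMap_def, List.map_flatten, List.sum_flatten, List.map_map, List.map_map]
  refine congrArg List.sum (List.map_congr_left fun p hp => ?_)
  simp only [Function.comp, List.flatMap_def, List.map_flatten, List.sum_flatten, List.map_map]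
  refine congrArg List.sum (List.map_congr_left fun q hq => ?_)
  simp only [Function.comp, pvEntrySlots, List.map_map]
  -- now: sum over ind of the guarded intersection size = sum over hours of (N - 1)
  have hX : (fun (r : String × List (String × List Int)) =>
      if r.1 ≠ p.1 then
        ((PySem.Set.inter (PySem.Set.ofList q.2)
           (PySem.Set.ofList ((PySem.Dict.mk r.2).getD q.1 []))).length : Int)
      else 0)
      = (fun r => ((PySem.Set.ofList q.2).map (fun h =>
          if r.1 ≠ p.1 then pvB r.2 q.1 h else 0)).sum) := by
    funext r
    by_cases hr : r.1 = p.1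
    · simp [hr]
    · rw [if_pos hr, pv_inter_len]
      refine congrArg List.sum (List.map_congr_left fun h _ => ?_)
      rw [if_pos hr]; rfl
  rw [hX, pv_sum_sum_comm]
  refine congrArg List.sum (List.map_congr_left fun h hh => ?_)
  -- per hour: sum over persons of guarded pvB = pvN - 1
  have hsplit : (fun (r : String × List (String × List Int)) =>
      if r.1 ≠ p.1 then pvB r.2 q.1 h else 0)
      = (fun r => pvB r.2 q.1 h + (if r.1 = p.1 then -pvB r.2 q.1 h else 0)) := by
    funext r; by_cases hr : r.1 = p.1 <;> simp [hr]
  rw [hsplit, PySem.List.sum_map_add_int,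
    pv_sum_ite_single ind Prod.fst hnames hp (fun r => -pvB r.2 q.1 h)]
  have hself : pvB p.2 q.1 h = 1 := by
    have hitems : (q.1, q.2) ∈ (PySem.Dict.mk p.2).items := by
      simpa [PySem.Dict.items] using hq
    have hkeys : (PySem.Dict.mk p.2).keys.Nodup := by
      simpa [PySem.Dict.keys] using hdays p hp
    rw [pvB, PySem.Dict.getD_of_mem_items _ hitems hkeys, if_pos hh]
  rw [hself]
  simp only [pvN, Function.comp]
  ring

-- ===== VERDICT (by name: the statement is the Claim_ definition above) =====
theorem calcula_fitness_spec : Claim_equal_calcula_fitness := by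
  intro individuo _hdom hpre
  show calcula_fitness individuo = calcula_fitness_alt individuo
  have hA : calcula_fitness individuo =
      max ((individuo.foldl (fun a p => p.2.foldl (fun a q => a + (q.2.length : Int)) a) 0)
        - (individuo.foldl (fun b p => p.2.foldl (fun b q =>
            individuo.foldl (fun (s : Int) r =>
              if r.1 ≠ p.1 then
                s + ((PySem.Set.inter (PySem.Set.ofList q.2)
                       (PySem.Set.ofList ((PySem.Dict.mk r.2).getD q.1 []))).length : Int)
              else s) b) b) 0) * 2) 1 := by
    have h1 : (fun (acc : Int × Int) (p : String × List (String × List Int)) =>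
        p.2.foldl (fun (acc : Int × Int) q =>
          (acc.1 + (q.2.length : Int),
           individuo.foldl (fun (s : Int) r =>
              if r.1 ≠ p.1 then
                s + ((PySem.Set.inter (PySem.Set.ofList q.2)
                       (PySem.Set.ofList ((PySem.Dict.mk r.2).getD q.1 []))).length : Int)
              else s) acc.2)) acc)
        = (fun (acc : Int × Int) p =>
            (p.2.foldl (fun a q => a + (q.2.length : Int)) acc.1,
             p.2.foldl (fun b q => individuo.foldl (fun (s : Int) r =>
              if r.1 ≠ p.1 then
                s + ((PySem.Set.inter (PySem.Set.ofList q.2)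
                       (PySem.Set.ofList ((PySem.Dict.mk r.2).getD q.1 []))).length : Int)
              else s) b) acc.2)) := by
      funext acc p
      exact pv_foldl_pair (fun a q => a + (q.2.length : Int))
        (fun b q => individuo.foldl (fun (s : Int) r =>
              if r.1 ≠ p.1 then
                s + ((PySem.Set.inter (PySem.Set.ofList q.2)
                       (PySem.Set.ofList ((PySem.Dict.mk r.2).getD q.1 []))).length : Int)
              else s) b) p.2 acc
    unfold calcula_fitness
    simp only [h1, pv_foldl_pair (fun a p => p.2.foldl (fun a q => a + (q.2.length : Int)) a)
      (fun b p => p.2.foldl (fun b q => individuo.foldl (fun (s : Int) r =>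
              if r.1 ≠ p.1 then
                s + ((PySem.Set.inter (PySem.Set.ofList q.2)
                       (PySem.Set.ofList ((PySem.Dict.mk r.2).getD q.1 []))).length : Int)
              else s) b) b) individuo ((0 : Int), (0 : Int))]
  have hB : calcula_fitness_alt individuo =
      max ((individuo.foldl (fun a p => p.2.foldl (fun a q => a + (q.2.length : Int)) a) 0)
        - 2 * ((PySem.Set.ofList (pvSlots individuo)).map
            ((fun c => c * (c - 1)) ∘ fun k => (((pvSlots individuo).count k : Nat) : Int))).sum) 1 := by
    have h2 : (fun (acc : Int × List (String × Int)) (p : String × List (String × List Int)) =>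
        p.2.foldl (fun (acc : Int × List (String × Int)) q =>
          (acc.1 + (q.2.length : Int),
           (PySem.Set.ofList q.2).foldl (fun sl h => sl ++ [(q.1, h)]) acc.2)) acc)
        = (fun (acc : Int × List (String × Int)) p =>
            (p.2.foldl (fun a q => a + (q.2.length : Int)) acc.1,
             p.2.foldl (fun b q => (PySem.Set.ofList q.2).foldl (fun sl h => sl ++ [(q.1, h)]) b) acc.2)) := by
      funext acc p
      exact pv_foldl_pair (fun a q => a + (q.2.length : Int))
        (fun b q => (PySem.Set.ofList q.2).foldl (fun sl h => sl ++ [(q.1, h)]) b) p.2 acc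
    unfold calcula_fitness_alt
    simp only [h2, pv_foldl_pair (fun a p => p.2.foldl (fun a q => a + (q.2.length : Int)) a)
      (fun b p => p.2.foldl (fun b q => (PySem.Set.ofList q.2).foldl (fun sl h => sl ++ [(q.1, h)]) b) b)
      individuo ((0 : Int), ([] : List (String × Int)))]
    simp only [PySem.List.foldl_append_singleton_eq_map, PySem.List.foldl_append_eq_flatMap,
      List.nil_append]
    rw [show (List.flatMap (fun p => List.flatMap (fun q => List.map (Prod.mk q.1) (PySem.Set.ofList q.2)) p.2) individuo) = pvSlots individuo from rfl,
      PySem.Dict.foldl_insert_getD_add_one_eq_counter]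
    have hvals : (PySem.Dict.counter (pvSlots individuo)).values
        = (PySem.Set.ofList (pvSlots individuo)).map (fun k => (((pvSlots individuo).count k : Nat) : Int)) := by
      show ((PySem.Dict.counter (pvSlots individuo)).items).map Prod.snd = _
      rw [PySem.Dict.items_counter, List.map_map]
      rfl
    rw [hvals, PySem.List.foldl_add, List.map_map, zero_add]
  rw [hA, hB, pv_sobreA individuo hpre,
    pv_sum_map_eq_dedup (pvSlots individuo) (fun k => pvN individuo k.1 k.2 - 1)]
  have hmap : (PySem.Set.ofList (pvSlots individuo)).map
        (fun k => (((pvSlots individuo).count k : Nat) : Int) * (pvN individuo k.1 k.2 - 1))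
      = (PySem.Set.ofList (pvSlots individuo)).map
        ((fun c => c * (c - 1)) ∘ fun k => (((pvSlots individuo).count k : Nat) : Int)) := by
    refine List.map_congr_left fun k _ => ?_
    have hk := pv_count_slots individuo hpre.2 k.1 k.2
    simp only [Function.comp_apply]
    rw [hk]
  rw [hmap]
  ring_nf
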